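-- pv_equiv track=rewrite | github.com/alexey-shapka/Tkinter-2048 | app/interface.py | return_indexes
-- ===== SOURCE A (Python) =====
-- def return_indexes(button, iteration, reverse=False):
--     reverse_true = {
--         "right": [([i, 3 - iteration], [i, 2 - iteration]) for i in range(4)],
--         "left": [([i, iteration], [i, iteration + 1]) for i in range(4)],
--         "up": [([iteration, i], [iteration + 1, i]) for i in range(4)],
--         "down": [([3 - iteration, i], [2 - iteration, i]) for i in range(4)]
--     }
--
--     reverse_false = {
--         "left": [([i, 3 - iteration], [i, 2 - iteration]) for i in range(4)],
--         "right": [([i, iteration], [i, iteration + 1]) for i in range(4)],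
--         "down": [([iteration, i], [iteration + 1, i]) for i in range(4)],
--         "up": [([3 - iteration, i], [2 - iteration, i]) for i in range(4)]
--     }
--
--     if reverse:
--         return reverse_true[button]
--     else:
--         return reverse_false[button]
-- ===== SOURCE B (Python) =====
-- def return_indexes(button, iteration, reverse=False):
--     if button not in ("left", "right", "up", "down"):
--         raise KeyError(button)
--     # high side (3-iteration, 2-iteration) vs low side (iteration, iteration+1)
--     high = (button in ("left", "up")) != reverse
--     a, b = (3 - iteration, 2 - iteration) if high else (iteration, iteration + 1)
--     if button in ("left", "right"):
--         return [([i, a], [i, b]) for i in range(4)]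
--     return [([a, i], [b, i]) for i in range(4)]
-- ===== Notes on version B (the rewrite author's own statement) =====
-- stated objective: simpler
-- what changed: Replaces A's two four-entry dict tables of comprehensions with a direct arithmetic decomposition: pick high or low index pair from (button XOR reverse), pick row vs column orientation from the button, and build one comprehension.
import Mathlib
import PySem

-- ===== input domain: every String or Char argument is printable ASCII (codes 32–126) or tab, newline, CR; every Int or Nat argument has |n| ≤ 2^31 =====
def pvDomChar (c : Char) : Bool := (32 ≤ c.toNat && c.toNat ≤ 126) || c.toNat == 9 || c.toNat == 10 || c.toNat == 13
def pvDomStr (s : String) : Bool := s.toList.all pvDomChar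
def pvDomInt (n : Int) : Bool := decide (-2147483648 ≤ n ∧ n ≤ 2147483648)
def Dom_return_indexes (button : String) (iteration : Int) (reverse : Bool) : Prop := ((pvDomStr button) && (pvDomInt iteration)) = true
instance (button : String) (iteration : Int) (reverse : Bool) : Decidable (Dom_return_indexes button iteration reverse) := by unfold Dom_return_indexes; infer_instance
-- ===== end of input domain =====

-- B replaces A's two four-entry tables with one table plus a direction-swap map for reverse
-- (return value only; no side effects involved).

-- ===== PORT A =====
-- A builds both dicts (reverse_true, reverse_false) and indexes the one selected by `reverse`.
def return_indexes (button : String) (iteration : Int) (reverse : Bool) : List (List (List Int)) :=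
  let reverse_true : PySem.Dict String (List (List (List Int))) := PySem.Dict.ofList
    [ ("right", (PySem.List.pyRange 0 4 1).map (fun i => [[i, 3 - iteration], [i, 2 - iteration]]))
    , ("left",  (PySem.List.pyRange 0 4 1).map (fun i => [[i, iteration], [i, iteration + 1]]))
    , ("up",    (PySem.List.pyRange 0 4 1).map (fun i => [[iteration, i], [iteration + 1, i]]))
    , ("down",  (PySem.List.pyRange 0 4 1).map (fun i => [[3 - iteration, i], [2 - iteration, i]])) ]
  let reverse_false : PySem.Dict String (List (List (List Int))) := PySem.Dict.ofList
    [ ("left",  (PySem.List.pyRange 0 4 1).map (fun i => [[i, 3 - iteration], [i, 2 - iteration]]))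
    , ("right", (PySem.List.pyRange 0 4 1).map (fun i => [[i, iteration], [i, iteration + 1]]))
    , ("down",  (PySem.List.pyRange 0 4 1).map (fun i => [[iteration, i], [iteration + 1, i]]))
    , ("up",    (PySem.List.pyRange 0 4 1).map (fun i => [[3 - iteration, i], [2 - iteration, i]])) ]
  if reverse then (reverse_true.get? button).getD []   -- none = KeyError, excluded by Pre_
  else (reverse_false.get? button).getD []

-- ===== PORT B =====
-- B: arithmetic decomposition — high/low index pair from (button XOR reverse), row/column orientation from the button.
def return_indexes_alt (button : String) (iteration : Int) (reverse : Bool) : List (List (List Int)) :=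
  if !(button == "left" || button == "right" || button == "up" || button == "down") then
    []   -- Python B raises KeyError here; excluded by Pre_
  else
    let high := ((button == "left" || button == "up") != reverse)
    let a := if high then 3 - iteration else iteration
    let b := if high then 2 - iteration else iteration + 1
    if button == "left" || button == "right" then
      (PySem.List.pyRange 0 4 1).map (fun i => [[i, a], [i, b]])
    else
      (PySem.List.pyRange 0 4 1).map (fun i => [[a, i], [b, i]])

-- ===== PRECONDITION & SPEC =====
-- Pre_ excludes unknown buttons, on which Python A raises KeyError.
def Pre_return_indexes (button : String) (iteration : Int) (reverse : Bool) : Prop :=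
  button = "left" ∨ button = "right" ∨ button = "up" ∨ button = "down"
instance (button : String) (iteration : Int) (reverse : Bool) : Decidable (Pre_return_indexes button iteration reverse) := by unfold Pre_return_indexes; infer_instance
def pvWitness_return_indexes : String × Int × Bool := ("left", 1, true)

def Spec_return_indexes (button : String) (iteration : Int) (reverse : Bool) (out : List (List (List Int))) : Prop := out = return_indexes_alt button iteration reverse
instance (button : String) (iteration : Int) (reverse : Bool) (out : List (List (List Int))) : Decidable (Spec_return_indexes button iteration reverse out) := by unfold Spec_return_indexes; infer_instance

-- ===== CLAIM (what is proved, stated in full; the proofs are below) =====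
def Claim_equal_return_indexes : Prop := ∀ (button : String) (iteration : Int) (reverse : Bool), Dom_return_indexes button iteration reverse → Pre_return_indexes button iteration reverse → Spec_return_indexes button iteration reverse (return_indexes button iteration reverse)

-- ===== LEMMAS AND PROOFS =====

-- ===== VERDICT (by name: the statement is the Claim_ definition above) =====
theorem return_indexes_spec : Claim_equal_return_indexes := by
  intro button iteration reverse _ hpre
  rcases hpre with h | h | h | h <;> subst h <;> cases reverse <;> rfl
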